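-- pv_equiv track=rewrite | github.com/Saikatriki2004/GFGPOTD_2025 | May_2025/May_28.py | ValidCorner
-- ===== SOURCE A (Python) =====
-- def ValidCorner(mat):
--     n = len(mat)
--     m = len(mat[0]) if n > 0 else 0
--
--     # Store the positions of 1s in each row using sets
--     row_ones = []
--     for i in range(n):
--         ones = set()
--         for j in range(m):
--             if mat[i][j] == 1:
--                 ones.add(j)
--         row_ones.append(ones)
--
--     # Check for any two rows that share at least two 1s in the same columns
--     for i in range(n):
--         for j in range(i + 1, n):
--             common = row_ones[i].intersection(row_ones[j])
--             if len(common) >= 2: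
--                 return True
--
--     return False
-- ===== SOURCE B (Python) =====
-- def ValidCorner(mat):
--     m = len(mat[0]) if mat else 0
--     seen = set()
--     for row in mat:
--         cols = [j for j in range(m) if row[j] == 1]
--         k = len(cols)
--         for a in range(k):
--             for b in range(a + 1, k):
--                 pair = (cols[a], cols[b])
--                 if pair in seen:
--                     return True
--                 seen.add(pair)
--     return False
-- ===== Notes on version B (the rewrite author's own statement) =====
-- stated objective: alternative
-- what changed: Instead of intersecting the 1-column sets of every pair of rows, B makes one pass over the rows hashing each row's column-pairs into a set and returns True on the first pair seen twice (early exit); measured ~2.4x at the largest timing size but not consistently across inputs, so no speed is claimed.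
import Mathlib
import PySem

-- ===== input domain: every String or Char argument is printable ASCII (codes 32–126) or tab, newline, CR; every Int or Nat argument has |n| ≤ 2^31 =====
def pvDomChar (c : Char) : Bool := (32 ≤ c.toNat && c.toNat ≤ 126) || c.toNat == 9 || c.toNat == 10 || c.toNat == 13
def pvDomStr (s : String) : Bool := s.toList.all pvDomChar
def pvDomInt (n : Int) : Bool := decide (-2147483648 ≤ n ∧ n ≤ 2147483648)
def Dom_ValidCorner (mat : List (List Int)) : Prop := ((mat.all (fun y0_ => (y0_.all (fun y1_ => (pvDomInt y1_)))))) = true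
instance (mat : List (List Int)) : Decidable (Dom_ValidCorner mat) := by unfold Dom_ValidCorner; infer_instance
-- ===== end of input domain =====

-- B replaces A's all-pairs row intersection by one pass hashing each row's column pairs into a set (first pair seen twice ⇒ rectangle); equivalence proved on matrices whose rows are at least as long as row 0 (elsewhere A raises IndexError).

-- ===== PORT A =====
-- literal transliteration of A; list indexing is ported with getD, exact under Pre_ (all indices in range there)
def ValidCorner (mat : List (List Int)) : Bool :=
  let n := mat.length
  let m := if n > 0 then (mat.headD []).length else 0
  let row_ones : List (PySem.Set Nat) :=
    (List.range n).foldl (fun acc i =>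
      acc ++ [(List.range m).foldl (fun ones j =>
        if (mat.getD i []).getD j 0 = 1 then PySem.Set.add ones j else ones)
        PySem.Set.empty]) []
  (List.range n).any (fun i =>
    (List.range' (i + 1) (n - (i + 1))).any (fun j =>
      decide (2 ≤ (PySem.Set.inter (row_ones.getD i []) (row_ones.getD j [])).length)))

-- ===== PORT B =====
-- the stream of pairs (cols[a], cols[b]), a < b, in B's loop order
def pvPairsB (cols : List Nat) : List (Nat × Nat) :=
  let k := cols.length
  (List.range k).flatMap (fun a =>
    (List.range' (a + 1) (k - (a + 1))).map (fun b => (cols.getD a 0, cols.getD b 0)))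

-- inner double loop of B: early-return None on a pair already seen, else the grown seen-set
def pvScanB (ps : List (Nat × Nat)) (seen : PySem.Set (Nat × Nat)) :
    Option (PySem.Set (Nat × Nat)) :=
  match ps with
  | [] => some seen
  | p :: rest =>
    if PySem.Set.contains seen p then none else pvScanB rest (PySem.Set.add seen p)

-- outer loop of B over the rows, threading the seen-set
def pvRowsB (rows : List (List Int)) (m : Nat) (seen : PySem.Set (Nat × Nat)) : Bool :=
  match rows with
  | [] => false
  | row :: rest =>
    let cols := (List.range m).filter (fun j => row.getD j 0 == 1)
    match pvScanB (pvPairsB cols) seen with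
    | none => true
    | some seen' => pvRowsB rest m seen'

def ValidCorner_alt (mat : List (List Int)) : Bool :=
  let m := if mat.length > 0 then (mat.headD []).length else 0
  pvRowsB mat m PySem.Set.empty

-- ===== PRECONDITION & SPEC =====
-- Pre_ excludes exactly the ragged matrices with a row shorter than row 0: there A indexes past that row's end and raises IndexError.
def Pre_ValidCorner (mat : List (List Int)) : Prop :=
  ∀ row ∈ mat, (mat.headD []).length ≤ row.length
instance (mat : List (List Int)) : Decidable (Pre_ValidCorner mat) := by
  unfold Pre_ValidCorner; infer_instance
def pvWitness_ValidCorner : List (List Int) := [[1, 1, 0], [0, 1, 1], [1, 1, 0]]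

def Spec_ValidCorner (mat : List (List Int)) (out : Bool) : Prop := out = ValidCorner_alt mat
instance (mat : List (List Int)) (out : Bool) : Decidable (Spec_ValidCorner mat out) := by
  unfold Spec_ValidCorner; infer_instance

-- ===== CLAIM (what is proved, stated in full; the proofs are below) =====
def Claim_equal_ValidCorner : Prop := ∀ (mat : List (List Int)), Dom_ValidCorner mat → Pre_ValidCorner mat → Spec_ValidCorner mat (ValidCorner mat)

-- ===== LEMMAS AND PROOFS =====

-- the columns of a row holding 1 (B's `cols`, and what A's per-row set works out to)
def pvCols (row : List Int) (m : Nat) : List Nat :=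
  (List.range m).filter (fun j => row.getD j 0 == 1)

theorem pvCols_pairwise (row : List Int) (m : Nat) : (pvCols row m).Pairwise (· < ·) :=
  List.Pairwise.filter _ (List.pairwise_lt_range)

theorem pvCols_nodup (row : List Int) (m : Nat) : (pvCols row m).Nodup :=
  (pvCols_pairwise row m).imp (fun h => Nat.ne_of_lt h)

-- A's row-building loop appends one set per row
theorem pv_foldl_append {α β : Type} (f : α → β) :
    ∀ (l : List α) (acc : List β),
      l.foldl (fun acc i => acc ++ [f i]) acc = acc ++ l.map f := by
  intro l
  induction l with
  | nil => intro acc; simp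
  | cons x l ih => intro acc; simp [List.foldl, ih, List.append_assoc]

-- A's inner set-building loop over a nodup, seen-disjoint list is an append of the filter
theorem pv_foldl_add_filter {P : Nat → Prop} [DecidablePred P] :
    ∀ (l : List Nat) (s : PySem.Set Nat), l.Nodup → (∀ x ∈ l, x ∉ s) →
      l.foldl (fun s j => if P j then PySem.Set.add s j else s) s
        = s ++ l.filter (fun j => decide (P j)) := by
  intro l
  induction l with
  | nil => intro s _ _; simp
  | cons x l ih =>
    intro s hnd hdisj
    by_cases hp : P x
    · have hx : x ∉ s := hdisj x (by simp)
      have : PySem.Set.add s x = s ++ [x] := PySem.Set.add_of_not_mem hx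
      simp only [List.foldl, hp, if_pos, this]
      rw [ih (s ++ [x]) hnd.of_cons]
      · simp [hp]
      · intro y hy
        simp only [List.mem_append, List.mem_singleton]
        rintro (h | rfl)
        · exact hdisj y (by simp [hy]) h
        · exact (List.nodup_cons.mp hnd).1 hy
    · simp only [List.foldl, hp, if_neg, not_false_iff]
      rw [ih s hnd.of_cons (fun y hy => hdisj y (by simp [hy]))]
      simp [hp]

-- B's inner scan in closed form
theorem pvScanB_eq : ∀ (ps : List (Nat × Nat)) (seen : PySem.Set (Nat × Nat)),
    seen.Nodup →
    pvScanB ps seen = if (seen ++ ps).Nodup then some (seen ++ ps) else none := by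
  intro ps
  induction ps with
  | nil => intro seen h; simp [pvScanB, h]
  | cons p rest ih =>
    intro seen h
    by_cases hp : p ∈ seen
    · have hc : PySem.Set.contains seen p = true := (PySem.Set.contains_iff seen p).mpr hp
      have hnn : ¬ (seen ++ p :: rest).Nodup := by
        intro hn
        exact (List.disjoint_of_nodup_append hn) hp (by simp)
      have hstep : pvScanB (p :: rest) seen = none := by
        unfold pvScanB; rw [hc]; simp
      rw [hstep, if_neg hnn]
    · have hc : PySem.Set.contains seen p = false := by
        by_contra hne
        exact hp ((PySem.Set.contains_iff seen p).mp (by simpa using hne))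
      have hadd : PySem.Set.add seen p = seen ++ [p] := PySem.Set.add_of_not_mem hp
      have hnd : (seen ++ [p]).Nodup := by
        rw [List.nodup_append]
        refine ⟨h, List.nodup_singleton p, ?_⟩
        intro a ha b hb
        rw [List.mem_singleton] at hb
        subst hb; exact fun he => hp (he ▸ ha)
      simp only [pvScanB, hc, Bool.false_eq_true, if_false, hadd]
      rw [ih (seen ++ [p]) hnd, List.append_assoc]
      rfl

-- B's outer loop in closed form (seen nodup)
theorem pvRowsB_eq : ∀ (rows : List (List Int)) (m : Nat) (seen : PySem.Set (Nat × Nat)),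
    seen.Nodup →
    pvRowsB rows m seen
      = !decide (seen ++ rows.flatMap (fun row => pvPairsB (pvCols row m))).Nodup := by
  intro rows
  induction rows with
  | nil => intro m seen h; simp [pvRowsB, h]
  | cons row rest ih =>
    intro m seen h
    have hcols : (List.range m).filter (fun j => row.getD j 0 == 1) = pvCols row m := rfl
    by_cases hn : (seen ++ pvPairsB (pvCols row m)).Nodup
    · have hscan := pvScanB_eq (pvPairsB (pvCols row m)) seen h
      rw [if_pos hn] at hscan
      simp only [pvRowsB, hcols, hscan]
      rw [ih m _ hn]
      simp [List.append_assoc]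
    · have hscan := pvScanB_eq (pvPairsB (pvCols row m)) seen h
      rw [if_neg hn] at hscan
      simp only [pvRowsB, hcols, hscan]
      have : ¬ (seen ++ (row :: rest).flatMap (fun row => pvPairsB (pvCols row m))).Nodup := by
        intro hbig
        apply hn
        have hsub : (seen ++ pvPairsB (pvCols row m)).Sublist
            (seen ++ (row :: rest).flatMap (fun row => pvPairsB (pvCols row m))) := by
          simp only [List.flatMap_cons, ← List.append_assoc]
          exact List.sublist_append_left _ _
        exact hbig.sublist hsub
      rw [List.flatMap_cons] at this
      simp [this]

-- membership in the pair stream of a strictly increasing column list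
theorem mem_pvPairsB {cols : List Nat} (hs : cols.Pairwise (· < ·)) {x y : Nat} :
    (x, y) ∈ pvPairsB cols ↔ x ∈ cols ∧ y ∈ cols ∧ x < y := by
  unfold pvPairsB
  simp only [List.mem_flatMap, List.mem_map, List.mem_range, List.mem_range'_1]
  constructor
  · rintro ⟨a, ha, b, ⟨hb1, hb2⟩, heq⟩
    have hbk : b < cols.length := by omega
    rw [List.getD_eq_getElem _ _ ha, List.getD_eq_getElem _ _ hbk] at heq
    injection heq with hx hy
    subst hx; subst hy
    exact ⟨List.getElem_mem ha, List.getElem_mem hbk,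
      List.pairwise_iff_getElem.mp hs a b ha hbk (by omega)⟩
  · rintro ⟨hx, hy, hlt⟩
    obtain ⟨a, ha, rfl⟩ := List.mem_iff_getElem.mp hx
    obtain ⟨b, hb, rfl⟩ := List.mem_iff_getElem.mp hy
    have hab : a < b := by
      by_contra hna
      rcases Nat.lt_or_ge b a with hba | hba
      · exact absurd hlt (Nat.lt_asymm (List.pairwise_iff_getElem.mp hs b a hb ha hba))
      · have : a = b := by omega
        subst this; exact (Nat.lt_irrefl _ hlt)
    refine ⟨a, ha, b, ⟨by omega, by omega⟩, ?_⟩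
    rw [List.getD_eq_getElem _ _ ha, List.getD_eq_getElem _ _ hb]

-- the pair stream of a strictly increasing column list has no duplicates
theorem nodup_pvPairsB {cols : List Nat} (hs : cols.Pairwise (· < ·)) :
    (pvPairsB cols).Nodup := by
  unfold pvPairsB
  rw [List.flatMap_def, List.nodup_flatten]
  constructor
  · intro l' hl'
    obtain ⟨a, ha, rfl⟩ := List.mem_map.mp hl'
    rw [List.mem_range] at ha
    refine List.Nodup.map_on ?_ (List.nodup_range' 1)
    intro b hb b' hb' heq
    rw [List.mem_range'_1] at hb hb'
    have hbk : b < cols.length := by omega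
    have hbk' : b' < cols.length := by omega
    have h2 := congrArg Prod.snd heq
    simp only at h2
    rw [List.getD_eq_getElem _ _ hbk, List.getD_eq_getElem _ _ hbk'] at h2
    by_contra hne
    rcases Nat.lt_or_ge b b' with hlt | hge
    · exact absurd h2 (Nat.ne_of_lt (List.pairwise_iff_getElem.mp hs b b' hbk hbk' hlt))
    · have hlt : b' < b := by omega
      exact absurd h2.symm (Nat.ne_of_lt (List.pairwise_iff_getElem.mp hs b' b hbk' hbk hlt))
  · rw [List.pairwise_iff_getElem]
    intro a a' ha ha' haa
    rw [List.getElem_map, List.getElem_map, List.disjoint_left]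
    intro p hp hp'
    rw [List.length_map, List.length_range] at ha ha'
    simp only [List.getElem_range] at hp hp'
    obtain ⟨b, hb, hpb⟩ := List.mem_map.mp hp
    obtain ⟨b', hb', hpb'⟩ := List.mem_map.mp hp'
    rw [List.mem_range'_1] at hb hb'
    have h1 := congrArg Prod.fst hpb
    have h1' := congrArg Prod.fst hpb'
    simp only at h1 h1'
    rw [List.getD_eq_getElem _ _ ha] at h1
    rw [List.getD_eq_getElem _ _ ha'] at h1'
    have := List.pairwise_iff_getElem.mp hs a a' ha ha' haa
    rw [h1, h1'] at this
    exact Nat.lt_irrefl _ this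

-- a nodup list has length ≥ 2 iff it has two distinct members
theorem two_le_length_iff {l : List Nat} (h : l.Nodup) :
    2 ≤ l.length ↔ ∃ x ∈ l, ∃ y ∈ l, x ≠ y := by
  match l, h with
  | [], _ => simp
  | [x], _ => simp
  | x :: y :: t, h =>
    simp only [List.length_cons]
    constructor
    · intro _
      refine ⟨x, by simp, y, by simp, ?_⟩
      intro he
      rw [List.nodup_cons] at h
      exact h.1 (he ▸ List.mem_cons_self ..)
    · intro _; omega

-- bridge: two rows share ≥ 2 one-columns iff their pair streams share a pair
theorem pv_bridge (r1 r2 : List Int) (m : Nat) :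
    2 ≤ (PySem.Set.inter (pvCols r1 m) (pvCols r2 m)).length
      ↔ ∃ p, p ∈ pvPairsB (pvCols r1 m) ∧ p ∈ pvPairsB (pvCols r2 m) := by
  have h1 := pvCols_pairwise r1 m
  have h2 := pvCols_pairwise r2 m
  have hnd : (PySem.Set.inter (pvCols r1 m) (pvCols r2 m)).Nodup :=
    PySem.Set.nodup_inter _ _ (pvCols_nodup r1 m)
  rw [two_le_length_iff hnd]
  constructor
  · rintro ⟨x, hx, y, hy, hne⟩
    rw [PySem.Set.mem_inter] at hx hy
    rcases Nat.lt_or_ge x y with hlt | hge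
    · exact ⟨(x, y), (mem_pvPairsB h1).mpr ⟨hx.1, hy.1, hlt⟩,
        (mem_pvPairsB h2).mpr ⟨hx.2, hy.2, hlt⟩⟩
    · have hlt : y < x := by omega
      exact ⟨(y, x), (mem_pvPairsB h1).mpr ⟨hy.1, hx.1, hlt⟩,
        (mem_pvPairsB h2).mpr ⟨hy.2, hx.2, hlt⟩⟩
  · rintro ⟨⟨x, y⟩, hp1, hp2⟩
    obtain ⟨hx1, hy1, hlt⟩ := (mem_pvPairsB h1).mp hp1
    obtain ⟨hx2, hy2, _⟩ := (mem_pvPairsB h2).mp hp2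
    exact ⟨x, (PySem.Set.mem_inter _ _ _).mpr ⟨hx1, hx2⟩,
      y, (PySem.Set.mem_inter _ _ _).mpr ⟨hy1, hy2⟩, Nat.ne_of_lt hlt⟩

-- A's inner per-row loop builds exactly the filter pvCols
theorem pv_ones_eq (row : List Int) (m : Nat) :
    (List.range m).foldl
      (fun ones j => if row.getD j 0 = 1 then PySem.Set.add ones j else ones)
      PySem.Set.empty = pvCols row m := by
  rw [pv_foldl_add_filter (P := fun j => row.getD j 0 = 1) (List.range m) PySem.Set.empty
    List.nodup_range (by intro x _ hx; simp [PySem.Set.empty] at hx)]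
  simp only [pvCols]
  apply List.filter_congr
  intro j _
  generalize row.getD j 0 = x
  by_cases h : x = 1
  · simp [h]
  · simp only [h, decide_false]
    exact (Bool.eq_false_iff.mpr (fun hb => h (eq_of_beq hb))).symm

-- ¬Nodup of the concatenated per-row pair streams = two rows sharing a pair
theorem pv_flat_iff (mat : List (List Int)) (m : Nat) :
    ¬ (mat.flatMap (fun row => pvPairsB (pvCols row m))).Nodup
      ↔ ∃ i j, i < j ∧ j < mat.length ∧
          ∃ p, p ∈ pvPairsB (pvCols (mat.getD i []) m)
             ∧ p ∈ pvPairsB (pvCols (mat.getD j []) m) := by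
  have hall : ∀ l' ∈ mat.map (fun row => pvPairsB (pvCols row m)), l'.Nodup := by
    intro l' hl'
    obtain ⟨row, _, rfl⟩ := List.mem_map.mp hl'
    exact nodup_pvPairsB (pvCols_pairwise row m)
  rw [List.flatMap_def, List.nodup_flatten]
  constructor
  · intro hnot
    have hpair : ¬ (mat.map (fun row => pvPairsB (pvCols row m))).Pairwise List.Disjoint :=
      fun hp => hnot ⟨hall, hp⟩
    rw [List.pairwise_iff_getElem] at hpair
    push Not at hpair
    obtain ⟨i, j, hi, hj, hij, hnd⟩ := hpair
    rw [List.length_map] at hi hj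
    rw [List.getElem_map, List.getElem_map, List.disjoint_left] at hnd
    push Not at hnd
    obtain ⟨p, hp1, hp2⟩ := hnd
    refine ⟨i, j, hij, hj, p, ?_, ?_⟩
    · rwa [List.getD_eq_getElem _ _ hi]
    · rwa [List.getD_eq_getElem _ _ hj]
  · rintro ⟨i, j, hij, hj, p, hp1, hp2⟩
    rintro ⟨_, hpd⟩
    have hi : i < mat.length := Nat.lt_trans hij hj
    rw [List.getD_eq_getElem _ _ hi] at hp1
    rw [List.getD_eq_getElem _ _ hj] at hp2
    have := List.pairwise_iff_getElem.mp hpd i j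
      (by rwa [List.length_map]) (by rwa [List.length_map]) hij
    rw [List.getElem_map, List.getElem_map] at this
    exact this hp1 hp2

theorem pv_A_iff (mat : List (List Int)) :
    ValidCorner mat = true ↔
      ∃ i j, i < j ∧ j < mat.length ∧
        2 ≤ (PySem.Set.inter
          (pvCols (mat.getD i []) (if mat.length > 0 then (mat.headD []).length else 0))
          (pvCols (mat.getD j []) (if mat.length > 0 then (mat.headD []).length else 0))).length := by
  unfold ValidCorner
  simp only [pv_foldl_append, pv_ones_eq]
  constructor
  · intro hA
    rw [List.any_eq_true] at hA
    obtain ⟨i, hi, hinner⟩ := hA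
    rw [List.mem_range] at hi
    rw [List.any_eq_true] at hinner
    obtain ⟨j, hj, hdec⟩ := hinner
    rw [List.mem_range'_1] at hj
    have hjn : j < mat.length := by omega
    rw [decide_eq_true_eq] at hdec
    rw [List.getD_eq_getElem _ _ (by simpa using hi),
        List.getD_eq_getElem _ _ (by simpa using hjn)] at hdec
    refine ⟨i, j, by omega, hjn, ?_⟩
    simpa using hdec
  · rintro ⟨i, j, hij, hjn, h⟩
    rw [List.any_eq_true]
    refine ⟨i, List.mem_range.mpr (by omega), ?_⟩
    rw [List.any_eq_true]
    refine ⟨j, List.mem_range'_1.mpr ⟨by omega, by omega⟩, ?_⟩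
    rw [decide_eq_true_eq]
    rw [List.getD_eq_getElem _ _ (by simp; omega),
        List.getD_eq_getElem _ _ (by simpa using hjn)]
    simpa using h

theorem pv_B_iff (mat : List (List Int)) :
    ValidCorner_alt mat = true ↔
      ∃ i j, i < j ∧ j < mat.length ∧
        ∃ p, p ∈ pvPairsB (pvCols (mat.getD i []) (if mat.length > 0 then (mat.headD []).length else 0))
             ∧ p ∈ pvPairsB (pvCols (mat.getD j []) (if mat.length > 0 then (mat.headD []).length else 0)) := by
  unfold ValidCorner_alt
  rw [pvRowsB_eq mat _ PySem.Set.empty List.nodup_nil]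
  have hcols : ∀ (row : List Int) (m : Nat),
      (List.range m).filter (fun j => row.getD j 0 == 1) = pvCols row m := fun _ _ => rfl
  rw [show (PySem.Set.empty ++ mat.flatMap
        (fun row => pvPairsB (pvCols row (if mat.length > 0 then (mat.headD []).length else 0))))
      = mat.flatMap (fun row => pvPairsB (pvCols row (if mat.length > 0 then (mat.headD []).length else 0)))
    from List.nil_append _]
  rw [Bool.not_eq_true', decide_eq_false_iff_not]
  exact pv_flat_iff mat _

theorem pv_main (mat : List (List Int)) : ValidCorner mat = ValidCorner_alt mat := by
  rw [Bool.eq_iff_iff, pv_A_iff, pv_B_iff]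
  constructor
  · rintro ⟨i, j, hij, hj, h⟩
    exact ⟨i, j, hij, hj, (pv_bridge _ _ _).mp h⟩
  · rintro ⟨i, j, hij, hj, h⟩
    exact ⟨i, j, hij, hj, (pv_bridge _ _ _).mpr h⟩

-- ===== VERDICT (by name: the statement is the Claim_ definition above) =====
theorem ValidCorner_spec : Claim_equal_ValidCorner := by
  intro mat _ _
  unfold Spec_ValidCorner
  exact pv_main mat
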